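-- pv_equiv track=rewrite | github.com/EvanSun96/codesignal | robinhoodprep.py | removingPairsGame
-- ===== SOURCE A (Python) =====
-- def removingPairsGame(numbers):
--     # if not like adjacent numbers moved after some been popped, then don't even need others
--     # just count how many pairs of adjacent duplicates ! ! !
--     stack = numbers
--     cnt = 0
--     while len(stack) > 1:
--         helperstack = []
--         while stack:
--             cur = stack.pop(-1)
--             if not helperstack or helperstack[-1] != cur:
--                 helperstack.append(cur)
--             else:
--                 helperstack.pop(-1)
--                 cnt += 1
--                 if not stack:
--                     break
--                 while helperstack:
--                     stack.append(helperstack.pop(-1))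
--                 break
--
--     if cnt % 2 == 1:
--         return 'Alice'
--     return 'Bob'
-- ===== SOURCE B (Python) =====
-- def removingPairsGame(numbers):
--     cnt = 0
--     stack = []
--     for x in reversed(numbers):
--         if stack and stack[-1] == x:
--             stack.pop()
--             cnt += 1
--         else:
--             stack.append(x)
--     if cnt % 2 == 1:
--         return 'Alice'
--     return 'Bob'
-- ===== Notes on version B (the rewrite author's own statement) =====
-- stated objective: faster
-- what changed: A repeatedly rescans the list from the end, removing one adjacent-duplicate pair per pass; B makes a single stack pass over the list counting every collapse, then checks the count's parity.
import Mathlib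
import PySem

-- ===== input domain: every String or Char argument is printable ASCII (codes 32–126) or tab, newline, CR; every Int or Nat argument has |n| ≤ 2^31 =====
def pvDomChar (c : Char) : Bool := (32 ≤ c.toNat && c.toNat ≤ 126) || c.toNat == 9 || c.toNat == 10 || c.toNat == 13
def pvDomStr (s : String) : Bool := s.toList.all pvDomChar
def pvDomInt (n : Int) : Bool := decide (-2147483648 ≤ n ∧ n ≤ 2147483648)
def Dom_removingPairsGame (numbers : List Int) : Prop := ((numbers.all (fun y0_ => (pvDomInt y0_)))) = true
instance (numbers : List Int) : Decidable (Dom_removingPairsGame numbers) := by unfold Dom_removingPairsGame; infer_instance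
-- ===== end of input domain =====

-- B replaces A's repeated end-to-start rescans (one pair removed per pass) by one stack pass; faster.
-- Python A empties the caller's list (stack aliases numbers); B does not. Equivalence here is about the return value only.

-- ===== PORT A =====
-- Both python stacks are kept reversed (list head = python list end), so pop(-1)/append become head operations.
-- Inner `while stack` loop of A: returns (none, cnt') when the loop left stack empty (loop
-- exhausted, or pair found with `not stack`), or (some restoredStack, cnt') when a pair was
-- found and helperstack was pushed back.
def pvAInner (stack helper : List Int) (cnt : Int) : Option (List Int) × Int :=
  match stack with
  | [] => (none, cnt)
  | cur :: rest =>
    match helper with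
    | [] => pvAInner rest [cur] cnt
    | h :: hs =>
      if h ≠ cur then pvAInner rest (cur :: h :: hs) cnt
      else if rest = [] then (none, cnt + 1)
      else (some (hs.reverse ++ rest), cnt + 1)

-- each pair removal shortens stack+helper by 2 (used for pvAOuter's termination)
theorem pvAInner_some_len : ∀ (stack helper : List Int) (cnt : Int) (s' : List Int) (c : Int),
    pvAInner stack helper cnt = (some s', c) → s'.length + 2 = stack.length + helper.length := by
  intro stack
  induction stack with
  | nil => intro helper cnt s' c h; simp [pvAInner] at h
  | cons cur rest ih =>
    intro helper cnt s' c h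
    match helper with
    | [] =>
      have := ih [cur] cnt s' c (by simpa [pvAInner] using h)
      simp at this ⊢; omega
    | hd :: hs =>
      by_cases hne : hd ≠ cur
      · have := ih (cur :: hd :: hs) cnt s' c (by simpa [pvAInner, hne] using h)
        simp at this ⊢; omega
      · simp only [pvAInner, if_neg hne] at h
        by_cases hr : rest = []
        · simp [hr] at h
        · simp [hr] at h
          obtain ⟨h1, _⟩ := h
          simp [← h1]; omega

-- outer `while len(stack) > 1` loop of A
def pvAOuter (stack : List Int) (cnt : Int) : Int :=
  if _hgt : stack.length > 1 then
    match hin : pvAInner stack [] cnt with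
    | (none, c) => c
    | (some s', c) => pvAOuter s' c
  else cnt
termination_by stack.length
decreasing_by
  have := pvAInner_some_len stack [] cnt s' c hin
  simp at this; omega

def removingPairsGame (numbers : List Int) : String :=
  if pvAOuter numbers.reverse 0 % 2 == 1 then "Alice" else "Bob"

-- ===== PORT B =====
-- one step of B's `for x in reversed(numbers)` loop; stack head = python stack top
def pvBStep (sc : List Int × Int) (x : Int) : List Int × Int :=
  match sc with
  | (t :: ts, c) => if t = x then (ts, c + 1) else (x :: t :: ts, c)
  | ([], c) => ([x], c)

def removingPairsGame_alt (numbers : List Int) : String :=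
  let r := numbers.reverse.foldl pvBStep ([], 0)
  if r.2 % 2 == 1 then "Alice" else "Bob"

-- ===== PRECONDITION & SPEC =====
def Spec_removingPairsGame (numbers : List Int) (out : String) : Prop := out = removingPairsGame_alt numbers
instance (numbers : List Int) (out : String) : Decidable (Spec_removingPairsGame numbers out) := by unfold Spec_removingPairsGame; infer_instance

-- ===== CLAIM (what is proved, stated in full; the proofs are below) =====
def Claim_equal_removingPairsGame : Prop := ∀ (numbers : List Int), Dom_removingPairsGame numbers → Spec_removingPairsGame numbers (removingPairsGame numbers)

-- ===== LEMMAS AND PROOFS =====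

-- feeding an adjacent-distinct list bottom-up into an empty B-stack just rebuilds it
theorem pvB_push_reduced : ∀ (hs : List Int) (c : Int), List.IsChain (· ≠ ·) hs →
    List.foldl pvBStep ([], c) hs.reverse = (hs, c) := by
  intro hs
  induction hs with
  | nil => intro c _; simp
  | cons a t ih =>
    intro c hch
    have hct : List.IsChain (· ≠ ·) t := hch.tail
    have : List.foldl pvBStep ([], c) (t.reverse ++ [a]) =
        pvBStep (List.foldl pvBStep ([], c) t.reverse) a := by
      simp [List.foldl_append]
    simp only [List.reverse_cons, this, ih c hct]
    match t, hch with
    | [], _ => simp [pvBStep]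
    | b :: ts, hch =>
      have hab : a ≠ b := List.rel_of_isChain_cons_cons hch
      simp [pvBStep, (Ne.symm hab)]

-- A's inner pass agrees with B's fold: either it finishes with B's count, or it hands the
-- restored stack to the outer loop with the same B-fold state
theorem pvAInner_fold : ∀ (stack helper : List Int) (cnt : Int), List.IsChain (· ≠ ·) helper →
    (∀ c, pvAInner stack helper cnt = (none, c) → (List.foldl pvBStep (helper, cnt) stack).2 = c) ∧
    (∀ s' c, pvAInner stack helper cnt = (some s', c) →
      List.foldl pvBStep (helper, cnt) stack = List.foldl pvBStep ([], c) s') := by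
  intro stack
  induction stack with
  | nil =>
    intro helper cnt _
    constructor
    · intro c h; simp [pvAInner] at h; simp [h]
    · intro s' c h; simp [pvAInner] at h
  | cons cur rest ih =>
    intro helper cnt hch
    match helper with
    | [] =>
      have hstep : List.foldl pvBStep (([] : List Int), cnt) (cur :: rest) =
          List.foldl pvBStep ([cur], cnt) rest := by simp [pvBStep]
      obtain ⟨h1, h2⟩ := ih [cur] cnt (List.isChain_singleton _)
      constructor
      · intro c h; rw [hstep]; exact h1 c (by simpa [pvAInner] using h)
      · intro s' c h; rw [hstep]; exact h2 s' c (by simpa [pvAInner] using h)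
    | hd :: hs =>
      by_cases hne : hd ≠ cur
      · have hstep : List.foldl pvBStep (hd :: hs, cnt) (cur :: rest) =
            List.foldl pvBStep (cur :: hd :: hs, cnt) rest := by simp [pvBStep, hne]
        obtain ⟨h1, h2⟩ := ih (cur :: hd :: hs) cnt (List.isChain_cons_cons.mpr ⟨Ne.symm hne, hch⟩)
        constructor
        · intro c h; rw [hstep]; exact h1 c (by simpa [pvAInner, hne] using h)
        · intro s' c h; rw [hstep]; exact h2 s' c (by simpa [pvAInner, hne] using h)
      · have heq : hd = cur := not_ne_iff.mp hne
        have hstep : List.foldl pvBStep (hd :: hs, cnt) (cur :: rest) =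
            List.foldl pvBStep (hs, cnt + 1) rest := by simp [pvBStep, heq]
        constructor
        · intro c h
          simp only [pvAInner, if_neg hne] at h
          by_cases hr : rest = []
          · simp [hr] at h; rw [hstep, hr]; simp [h]
          · simp [hr] at h
        · intro s' c h
          simp only [pvAInner, if_neg hne] at h
          by_cases hr : rest = []
          · simp [hr] at h
          · simp [hr] at h
            obtain ⟨h1, h2⟩ := h
            subst h1 h2
            rw [hstep, List.foldl_append, pvB_push_reduced hs (cnt + 1) hch.tail]

-- A's outer loop computes exactly B's single-pass count
theorem pvAOuter_eq_fold : ∀ (n : ℕ) (stack : List Int) (cnt : Int), stack.length ≤ n →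
    pvAOuter stack cnt = (List.foldl pvBStep ([], cnt) stack).2 := by
  intro n
  induction n with
  | zero =>
    intro stack cnt hlen
    have : stack = [] := List.eq_nil_of_length_eq_zero (by omega)
    subst this; simp [pvAOuter]
  | succ n ih =>
    intro stack cnt hlen
    by_cases hgt : stack.length > 1
    · rw [pvAOuter, dif_pos hgt]
      obtain ⟨h1, h2⟩ := pvAInner_fold stack [] cnt List.isChain_nil
      rcases hin : pvAInner stack [] cnt with ⟨os, c⟩
      match os with
      | none => simp only; exact (h1 c hin).symm
      | some s' =>
        simp only
        have hlen' : s'.length + 2 = stack.length := by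
          have := pvAInner_some_len stack [] cnt s' c hin; simpa using this
        rw [ih s' c (by omega), h2 s' c hin]
    · rw [pvAOuter, dif_neg hgt]
      match stack, hgt with
      | [], _ => simp
      | [x], _ => simp [pvBStep]
      | _ :: _ :: _, hgt => simp at hgt

-- ===== VERDICT (by name: the statement is the Claim_ definition above) =====
theorem removingPairsGame_spec : Claim_equal_removingPairsGame := by
  intro numbers _
  unfold Spec_removingPairsGame removingPairsGame removingPairsGame_alt
  rw [pvAOuter_eq_fold numbers.reverse.length numbers.reverse 0 le_rfl]
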